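-- pv_equiv track=rewrite | github.com/samjazaaa/AoC | 2023/07/joker.py | is_double_pair
-- ===== SOURCE A (Python) =====
-- def is_double_pair(cards):
--     if not "J" in cards:
--         first_symbol = ""
--         for c in cards:
--             if cards.count(c) == 2:
--                 if first_symbol == "" or first_symbol == c:
--                     first_symbol = c
--                 else:
--                     return True
--         return False
--
--     jokers = cards.count("J")
--     cleaned = cards.replace("J", "")
--
--     if jokers >= 2:
--         return True
--
--     # only 1 Joker
--     return is_pair(cleaned)
--
-- def is_pair(cards):
--     if "J" in cards:
--         return True
--
--     for c in cards:
--         if cards.count(c) == 2: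
--             return True
--     return False
-- ===== SOURCE B (Python) =====
-- def is_double_pair(cards):
--     counts = {}
--     jokers = 0
--     for c in cards:
--         if c == 'J':
--             jokers += 1
--         else:
--             counts[c] = counts.get(c, 0) + 1
--     pairs = sum(1 for v in counts.values() if v == 2)
--     if jokers >= 2:
--         return True
--     if jokers == 1:
--         return pairs >= 1
--     return pairs >= 2
-- ===== Notes on version B (the rewrite author's own statement) =====
-- stated objective: faster
-- what changed: Replaces A's repeated cards.count() scans inside a first-symbol tracking loop and the separate is_pair helper by a single pass that builds one frequency table over the non-J characters plus a joker counter, then decides with a flat branch on the joker count.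
import Mathlib
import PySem

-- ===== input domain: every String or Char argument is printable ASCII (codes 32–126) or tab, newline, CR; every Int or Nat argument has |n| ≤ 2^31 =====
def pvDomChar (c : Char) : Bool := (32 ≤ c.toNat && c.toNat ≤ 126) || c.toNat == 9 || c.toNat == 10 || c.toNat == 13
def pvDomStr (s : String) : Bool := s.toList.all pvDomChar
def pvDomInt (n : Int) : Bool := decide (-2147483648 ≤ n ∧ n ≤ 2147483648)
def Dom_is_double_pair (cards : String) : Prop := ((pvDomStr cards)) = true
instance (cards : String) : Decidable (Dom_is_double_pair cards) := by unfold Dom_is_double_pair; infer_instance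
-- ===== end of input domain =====

-- B replaces A's repeated .count scans and the is_pair helper by one frequency-table pass
-- plus a flat branch on the joker count (faster on long pair-free strings).

-- ===== PORT A =====
-- loop of A's no-J branch; 'cards.count(c)' for a 1-char c is exactly the char count (List.count)
def pvALoop (cards : List Char) : List Char → List Char → Bool
  | [], _ => false
  | c :: rest, first =>
    if cards.count c = 2 then
      if first = [] ∨ first = [c] then pvALoop cards rest [c]
      else true
    else pvALoop cards rest first

-- loop of is_pair
def pvIsPairLoop (cards : List Char) : List Char → Bool
  | [] => false
  | c :: rest => if cards.count c = 2 then true else pvIsPairLoop cards rest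

-- helper is_pair; '"J" in cards' for the 1-char pattern is exactly List.contains
def pvIsPair (cards : List Char) : Bool :=
  if cards.contains 'J' then true
  else pvIsPairLoop cards cards

def is_double_pair (cards : String) : Bool :=
  let cs := cards.toList
  if !(cs.contains 'J') then
    pvALoop cs cs []
  else
    let jokers := cs.count 'J'
    -- cards.replace("J", "") for the 1-char pattern is exactly the filter
    let cleaned := cs.filter (fun c => c != 'J')
    if jokers ≥ 2 then true
    else pvIsPair cleaned

-- ===== PORT B =====
-- B's single pass: joker counter + frequency dict over the non-J characters
def pvTally : List Char → PySem.Dict Char Int → Int → PySem.Dict Char Int × Int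
  | [], d, j => (d, j)
  | c :: rest, d, j =>
    if c = 'J' then pvTally rest d (j + 1)
    else pvTally rest (d.insert c (d.getD c 0 + 1)) j

def is_double_pair_alt (cards : String) : Bool :=
  let t := pvTally cards.toList PySem.Dict.empty 0
  let pairs := t.1.values.countP (fun v => v == (2 : Int))
  if t.2 ≥ 2 then true
  else if t.2 = 1 then decide (1 ≤ pairs)
  else decide (2 ≤ pairs)

-- ===== PRECONDITION & SPEC =====
def Spec_is_double_pair (cards : String) (out : Bool) : Prop := out = is_double_pair_alt cards
instance (cards : String) (out : Bool) : Decidable (Spec_is_double_pair cards out) := by unfold Spec_is_double_pair; infer_instance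

-- ===== CLAIM (what is proved, stated in full; the proofs are below) =====
def Claim_equal_is_double_pair : Prop := ∀ (cards : String), Dom_is_double_pair cards → Spec_is_double_pair cards (is_double_pair cards)

-- ===== LEMMAS AND PROOFS =====

theorem pvTally_spec (l : List Char) (d : PySem.Dict Char Int) (j : Int) :
    pvTally l d j =
      ((l.filter (fun c => c != 'J')).foldl (fun d c => d.insert c (d.getD c 0 + 1)) d,
       j + l.count 'J') := by
  induction l generalizing d j with
  | nil => simp [pvTally]
  | cons c rest ih =>
    by_cases h : c = 'J' <;>
      simp [pvTally, h, ih, add_comm, add_left_comm]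

theorem pvALoop_some (cs : List Char) (f : Char) (rest : List Char) :
    pvALoop cs rest [f] = decide (∃ c ∈ rest, cs.count c = 2 ∧ c ≠ f) := by
  induction rest with
  | nil => simp [pvALoop]
  | cons c rest ih =>
    by_cases h2 : cs.count c = 2
    · by_cases hf : f = c
      · subst hf
        simp [pvALoop, h2, ih]
      · have : ¬ ([f] = [] ∨ [f] = [c]) := by simp [hf]
        simp only [pvALoop, h2, if_true, this, if_false]
        symm
        simp only [decide_eq_true_iff]
        exact ⟨c, .head _, h2, Ne.symm hf⟩
    · simp only [pvALoop, h2, if_false, ih]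
      rw [decide_eq_decide]
      constructor
      · rintro ⟨x, hx, h⟩; exact ⟨x, .tail _ hx, h⟩
      · rintro ⟨x, hx, hcx, hne⟩
        rcases List.mem_cons.1 hx with rfl | hx
        · exact absurd hcx h2
        · exact ⟨x, hx, hcx, hne⟩

theorem pvALoop_none (cs : List Char) (rest : List Char) :
    pvALoop cs rest [] =
      decide (∃ x ∈ rest, ∃ y ∈ rest, cs.count x = 2 ∧ cs.count y = 2 ∧ x ≠ y) := by
  induction rest with
  | nil => simp [pvALoop]
  | cons c rest ih =>
    by_cases h2 : cs.count c = 2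
    · rw [show pvALoop cs (c :: rest) [] = pvALoop cs rest [c] from by simp [pvALoop, h2]]
      rw [pvALoop_some, decide_eq_decide]
      constructor
      · rintro ⟨y, hy, hcy, hne⟩
        exact ⟨c, .head _, y, .tail _ hy, h2, hcy, Ne.symm hne⟩
      · rintro ⟨x, hx, y, hy, hcx, hcy, hne⟩
        rcases List.mem_cons.1 hx with hxe | hx
        · rcases List.mem_cons.1 hy with hye | hy
          · exact absurd (hxe.trans hye.symm) hne
          · exact ⟨y, hy, hcy, fun h => hne (h ▸ hxe)⟩
        · rcases List.mem_cons.1 hy with hye | hy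
          · exact ⟨x, hx, hcx, fun h => hne (hye ▸ h)⟩
          · by_cases hxc : x = c
            · exact ⟨y, hy, hcy, fun h => hne (hxc.trans h.symm)⟩
            · exact ⟨x, hx, hcx, hxc⟩
    · rw [show pvALoop cs (c :: rest) [] = pvALoop cs rest [] from by simp [pvALoop, h2]]
      rw [ih, decide_eq_decide]
      constructor
      · rintro ⟨x, hx, y, hy, h⟩
        exact ⟨x, .tail _ hx, y, .tail _ hy, h⟩
      · rintro ⟨x, hx, y, hy, hcx, hcy, hne⟩
        rcases List.mem_cons.1 hx with rfl | hx
        · exact absurd hcx h2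
        rcases List.mem_cons.1 hy with rfl | hy
        · exact absurd hcy h2
        exact ⟨x, hx, y, hy, hcx, hcy, hne⟩

theorem pvIsPairLoop_spec (cs rest : List Char) :
    pvIsPairLoop cs rest = decide (∃ c ∈ rest, cs.count c = 2) := by
  induction rest with
  | nil => simp [pvIsPairLoop]
  | cons c rest ih =>
    by_cases h2 : cs.count c = 2 <;> simp [pvIsPairLoop, h2, ih]

-- a Nodup list has length ≥ 2 iff it holds two distinct elements
theorem nodup_two_le_length {α : Type} (l : List α) (h : l.Nodup) :
    2 ≤ l.length ↔ ∃ x ∈ l, ∃ y ∈ l, x ≠ y := by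
  constructor
  · intro hl
    match l, h with
    | a :: b :: t, h =>
      refine ⟨a, .head _, b, .tail _ (.head _), ?_⟩
      intro hab; subst hab
      simp [List.nodup_cons] at h
  · rintro ⟨x, hx, y, hy, hne⟩
    match l with
    | [] => simp at hx
    | [a] =>
      simp at hx hy; subst hx; subst hy; exact absurd rfl hne
    | a :: b :: t => simp

-- B's pair counter counts the distinct characters occurring exactly twice
theorem pairs_eq (xs : List Char) :
    (PySem.Dict.counter xs).values.countP (fun v => v == (2 : Int)) =
      ((PySem.List.dedup xs).filter (fun k => xs.count k == 2)).length := by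
  have hv : (PySem.Dict.counter xs).values
      = (PySem.Set.ofList xs).map (fun k => (xs.count k : Int)) := by
    show ((PySem.Dict.counter xs).items).map (·.2) = _
    rw [PySem.Dict.items_counter]
    simp [List.map_map, Function.comp]
  rw [hv, List.countP_map, ← PySem.List.dedup_eq_ofList, List.countP_eq_length_filter]
  congr 1
  apply List.filter_congr
  intro k _
  show ((xs.count k : Int) == 2) = (xs.count k == 2)
  rw [Bool.eq_iff_iff, beq_iff_eq, beq_iff_eq]
  omega

-- ===== VERDICT (by name: the statement is the Claim_ definition above) =====
theorem is_double_pair_spec : Claim_equal_is_double_pair := by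
  intro cards _
  unfold Spec_is_double_pair
  simp only [is_double_pair, is_double_pair_alt, pvTally_spec,
    PySem.Dict.foldl_insert_getD_add_one_eq_counter, pairs_eq]
  set cs := cards.toList with hcs
  set nonJ := cs.filter (fun c => c != 'J') with hnonJ
  set P := ((PySem.List.dedup nonJ).filter (fun k => nonJ.count k == 2)).length with hP
  by_cases hJ : cs.contains 'J'
  · -- A takes the joker path
    simp only [hJ, Bool.not_true, Bool.false_eq_true, if_false]
    have hcnt : 1 ≤ cs.count 'J' := by
      rwa [Nat.one_le_iff_ne_zero, ← Nat.pos_iff_ne_zero, List.count_pos_iff, ← List.contains_iff_mem]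
    by_cases h2 : 2 ≤ cs.count 'J'
    · simp [h2]
    · -- exactly one joker
      have h1 : cs.count 'J' = 1 := by omega
      rw [h1]
      norm_num
      -- A: is_pair on cleaned = nonJ ; nonJ has no 'J'
      have hnoJ : nonJ.contains 'J' = false := by
        simp [hnonJ, List.mem_filter]
      unfold pvIsPair
      rw [hnoJ]
      simp only [Bool.false_eq_true, if_false]
      rw [pvIsPairLoop_spec, decide_eq_decide]
      constructor
      · rintro ⟨c, hc, hcc⟩
        have hmem : c ∈ (PySem.List.dedup nonJ).filter (fun k => nonJ.count k == 2) := by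
          simp only [List.mem_filter, PySem.List.mem_dedup, beq_iff_eq]
          exact ⟨hc, by simpa using hcc⟩
        have hlen := List.length_pos_of_mem hmem
        omega
      · intro h
        obtain ⟨c, hc⟩ := List.exists_mem_of_length_pos (show 0 < P by omega)
        rcases List.mem_filter.1 hc with ⟨hcd, hcc⟩
        exact ⟨c, (PySem.List.mem_dedup _ _).1 hcd, by simpa using hcc⟩
  · -- no joker: A scans for two distinct pair symbols
    simp only [hJ, Bool.not_false, if_true]
    have hcnt : cs.count 'J' = 0 := by
      rw [List.count_eq_zero]
      intro hm; exact hJ ((List.contains_iff_mem).2 hm)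
    have hself : nonJ = cs := by
      rw [hnonJ, List.filter_eq_self]
      intro a ha
      simp only [bne_iff_ne, ne_eq]
      rintro rfl
      exact hJ ((List.contains_iff_mem).2 ha)
    rw [hcnt]
    norm_num
    rw [pvALoop_none, decide_eq_decide, hP, hself,
      nodup_two_le_length _ (List.Nodup.filter _ (PySem.List.nodup_dedup cs))]
    constructor
    · rintro ⟨x, hx, y, hy, hcx, hcy, hne⟩
      refine ⟨x, ?_, y, ?_, hne⟩ <;>
        · simp only [List.mem_filter, PySem.List.mem_dedup, beq_iff_eq]
          exact ⟨by assumption, by assumption⟩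
    · rintro ⟨x, hx, y, hy, hne⟩
      rcases List.mem_filter.1 hx with ⟨hxd, hxc⟩
      rcases List.mem_filter.1 hy with ⟨hyd, hyc⟩
      exact ⟨x, (PySem.List.mem_dedup _ _).1 hxd, y, (PySem.List.mem_dedup _ _).1 hyd, by simpa using hxc, by simpa using hyc, hne⟩
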